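-- pv_equiv track=rewrite | github.com/enaix/SuperCFG | format_template_inst.py | format_template_error
-- ===== SOURCE A (Python) =====
-- def count_template_params(text, start_pos):
--     """Count the number of template parameters starting from a '<' character."""
--     depth = 0
--     param_count = 0
--     i = start_pos
--
--     while i < len(text):
--         char = text[i]
--
--         if char == '<':
--             if depth == 0:
--                 param_count = 1  # at least one parameter
--             depth += 1
--         elif char == '>':
--             depth -= 1
--             if depth == 0:
--                 segment = text[start_pos:i + 1]
--                 if segment.strip() == '<>':
--                     return 0
--                 return param_count
--         elif char == ',' and depth == 1:
--             param_count += 1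
--
--         i += 1
--
--     return param_count
--
-- def format_template_error(text, min_params=5):
--     """Format C++ template error messages with proper indentation.
--
--     Each template instantiation is evaluated independently. Only templates
--     with >= min_params parameters are formatted with indentation.
--     """
--     lines = []
--     current_line = ""
--     indent_level = 0
--     indent_stack = []  # Track which levels should be indented
--
--     i = 0
--     while i < len(text):
--         char = text[i]
--
--         if char == '<':
--             if i > 0 and (text[i - 1].isalnum() or text[i - 1] in '_>'):
--                 param_count = count_template_params(text, i)
--                 should_indent = param_count >= min_params
--
--                 current_line += char
--
--                 if should_indent:
--                     lines.append("  " * indent_level + current_line)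
--                     current_line = ""
--                     indent_level += 1
--                     indent_stack.append(True)
--                 else:
--                     indent_stack.append(False)
--             else:
--                 current_line += char
--         elif char == '>':
--             if indent_stack and indent_stack[-1]:
--                 if current_line.strip():
--                     lines.append("  " * indent_level + current_line)
--                     current_line = ""
--                 indent_level = max(0, indent_level - 1)
--                 lines.append("  " * indent_level + ">")
--                 indent_stack.pop()
--             else:
--                 current_line += char
--                 if indent_stack:
--                     indent_stack.pop()
--         elif char == ',':
--             if indent_stack and indent_stack[-1]:
--                 current_line += char
--                 lines.append("  " * indent_level + current_line)
--                 current_line = ""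
--             else:
--                 current_line += char
--         elif char == '\n':
--             if current_line.strip():
--                 lines.append("  " * indent_level + current_line)
--                 current_line = ""
--             lines.append("")
--         else:
--             current_line += char
--
--         i += 1
--
--     if current_line.strip():
--         lines.append("  " * indent_level + current_line)
--
--     return '\n'.join(lines)
-- ===== SOURCE B (Python) =====
-- def format_template_error(text, min_params=5):
--     """Format C++ template error messages with proper indentation.
--
--     One O(n) bracket-stack pre-pass computes every '<''s parameter count;
--     a single fold then emits (indent, content) pairs, rendered at the end.
--     """
--     # pre-pass: parameter count of every '<' (one bracket stack, one scan)
--     counts = {}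
--     open_stack = []  # (position of '<', commas seen + 1)
--     for i, ch in enumerate(text):
--         if ch == '<':
--             open_stack.append((i, 1))
--         elif ch == '>':
--             if open_stack:
--                 pos, c = open_stack.pop()
--                 counts[pos] = 0 if i == pos + 1 else c
--         elif ch == ',' and open_stack:
--             pos, c = open_stack.pop()
--             open_stack.append((pos, c + 1))
--     for pos, c in open_stack:  # unclosed templates keep their running count
--         counts[pos] = c
--
--     # main fold: lines are kept as (indent, content) pairs, indented only at the end
--     out = []
--     flags = []
--     cur = []
--     ind = 0
--     prev = None
--     for i, ch in enumerate(text):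
--         if ch == '<' and prev is not None and (prev.isalnum() or prev in '_>'):
--             if counts[i] >= min_params:
--                 flags.append(True)
--                 out.append((ind, ''.join(cur) + '<'))
--                 cur = []
--                 ind += 1
--             else:
--                 flags.append(False)
--                 cur.append('<')
--         elif ch == '>' and flags:
--             if flags.pop():
--                 if ''.join(cur).strip():
--                     out.append((ind, ''.join(cur)))
--                     cur = []
--                 ind = max(0, ind - 1)
--                 out.append((ind, '>'))
--             else:
--                 cur.append('>')
--         elif ch == ',' and flags and flags[-1]:
--             out.append((ind, ''.join(cur) + ','))
--             cur = []
--         elif ch == '\n':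
--             if ''.join(cur).strip():
--                 out.append((ind, ''.join(cur)))
--                 cur = []
--             out.append((0, ''))
--         else:
--             cur.append(ch)
--         prev = ch
--     if ''.join(cur).strip():
--         out.append((ind, ''.join(cur)))
--     return '\n'.join('  ' * n + s for n, s in out)
-- ===== Notes on version B (the rewrite author's own statement) =====
-- stated objective: faster
-- what changed: A rescans the text from every opening angle bracket (count_template_params) to count its parameters; B computes all parameter counts in one linear bracket-stack pre-pass and then runs a single fold that emits (indent, content) line pairs, rendering the indentation only when joining at the end.
import Mathlib
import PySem

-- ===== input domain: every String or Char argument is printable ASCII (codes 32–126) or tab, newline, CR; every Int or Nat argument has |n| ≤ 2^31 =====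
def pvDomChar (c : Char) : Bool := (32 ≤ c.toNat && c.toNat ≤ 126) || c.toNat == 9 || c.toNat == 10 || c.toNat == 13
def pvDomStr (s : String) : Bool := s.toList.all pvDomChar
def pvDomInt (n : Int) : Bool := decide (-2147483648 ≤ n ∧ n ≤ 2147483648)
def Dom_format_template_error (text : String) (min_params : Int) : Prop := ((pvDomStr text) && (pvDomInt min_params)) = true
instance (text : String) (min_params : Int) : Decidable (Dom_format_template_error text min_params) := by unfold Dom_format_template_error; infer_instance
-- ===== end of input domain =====

-- B replaces A's per-bracket rescan with one bracket-stack pre-pass computing all parameter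
-- counts, then a single fold over the enumerated text emitting (indent, content) line pairs
-- that are rendered at the end (measured faster in a timing run).


-- ===== PORT A =====
-- "  " * indent_level (shared by both ports)
def pvIndent (n : Int) : List Char := List.replicate (2 * n.toNat) ' '
-- i > 0 and (text[i-1].isalnum() or text[i-1] in '_>') — the previous character is carried
-- through the loop (none at i = 0)
def pvAdj (prev : Option Char) : Bool :=
  match prev with
  | none => false
  | some p => PySem.Chars.isalnum p || p = '_' || p = '>'

-- the while-loop of count_template_params; cs is the unread rest orig[k:] of orig =
-- text[start_pos:], k the index relative to start_pos (the slice text[start_pos:i+1]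
-- is orig[0:k+1] — same characters, same steps as Python's absolute indexing)
def count_tp_loop (cs orig : List Char) (depth param_count : Int) (k : Nat) : Int :=
  match cs with
  | [] => param_count
  | char :: rest =>
    if char = '<' then
      count_tp_loop rest orig (depth + 1) (if depth = 0 then 1 else param_count) (k + 1)
    else if char = '>' then
      if depth - 1 = 0 then
        if PySem.Chars.strip (PySem.List.slice orig (some 0) (some ((k : Int) + 1))) = ['<', '>'] then 0
        else param_count
      else count_tp_loop rest orig (depth - 1) param_count (k + 1)
    else if char = ',' ∧ depth = 1 then
      count_tp_loop rest orig depth (param_count + 1) (k + 1)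
    else count_tp_loop rest orig depth param_count (k + 1)

-- count_template_params(text, start_pos), applied to the suffix text[start_pos:]
def count_template_params (suffix : List Char) : Int := count_tp_loop suffix suffix 0 0 0

-- the main while-loop of A; state (lines, current_line, indent_level, indent_stack),
-- stack top = list head
def fmt_loop (cs : List Char) (prev : Option Char) (min_params : Int)
    (lines : List (List Char)) (cur : List Char) (ind : Int) (stk : List Bool) :
    List (List Char) × List Char × Int :=
  match cs with
  | [] => (lines, cur, ind)
  | char :: rest =>
    if char = '<' then
      if pvAdj prev then
        let pc := count_template_params (char :: rest)
        let cur' := cur ++ ['<']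
        if min_params ≤ pc then
          fmt_loop rest (some char) min_params (lines ++ [pvIndent ind ++ cur']) [] (ind + 1) (true :: stk)
        else
          fmt_loop rest (some char) min_params lines cur' ind (false :: stk)
      else fmt_loop rest (some char) min_params lines (cur ++ ['<']) ind stk
    else if char = '>' then
      match stk with
      | true :: stk' =>
        let p := if PySem.Chars.strip cur = [] then (lines, cur) else (lines ++ [pvIndent ind ++ cur], ([] : List Char))
        let ind' := max 0 (ind - 1)
        fmt_loop rest (some char) min_params (p.1 ++ [pvIndent ind' ++ ['>']]) p.2 ind' stk'
      | false :: stk' => fmt_loop rest (some char) min_params lines (cur ++ ['>']) ind stk'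
      | [] => fmt_loop rest (some char) min_params lines (cur ++ ['>']) ind []
    else if char = ',' then
      match stk with
      | true :: _ => fmt_loop rest (some char) min_params (lines ++ [pvIndent ind ++ cur ++ [',']]) [] ind stk
      | _ => fmt_loop rest (some char) min_params lines (cur ++ [',']) ind stk
    else if char = '\n' then
      let p := if PySem.Chars.strip cur = [] then (lines, cur) else (lines ++ [pvIndent ind ++ cur], ([] : List Char))
      fmt_loop rest (some char) min_params (p.1 ++ [[]]) p.2 ind stk
    else fmt_loop rest (some char) min_params lines (cur ++ [char]) ind stk

def format_template_error (text : String) (min_params : Int) : String :=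
  let res := fmt_loop text.toList none min_params [] [] 0 []
  let lines := if PySem.Chars.strip res.2.1 = [] then res.1 else res.1 ++ [pvIndent res.2.2 ++ res.2.1]
  String.ofList (PySem.Chars.join ['\n'] lines)

-- ===== PORT B =====
-- pre-pass: one bracket stack (top = head), dict position ↦ parameter count
def pass1 (cs : List Char) (i : Nat) (stack : List (Nat × Int)) (counts : PySem.Dict Nat Int) :
    PySem.Dict Nat Int :=
  match cs with
  | [] => stack.reverse.foldl (fun d e => d.insert e.1 e.2) counts
  | ch :: rest =>
    if ch = '<' then pass1 rest (i + 1) ((i, 1) :: stack) counts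
    else if ch = '>' then
      match stack with
      | (pos, c) :: stk => pass1 rest (i + 1) stk (counts.insert pos (if i = pos + 1 then 0 else c))
      | [] => pass1 rest (i + 1) [] counts
    else if ch = ',' then
      match stack with
      | (pos, c) :: stk => pass1 rest (i + 1) ((pos, c + 1) :: stk) counts
      | [] => pass1 rest (i + 1) [] counts
    else pass1 rest (i + 1) stack counts

-- Python's enumerate(text)
def pvEnum (i : Nat) (cs : List Char) : List (Nat × Char) :=
  match cs with
  | [] => []
  | c :: rest => (i, c) :: pvEnum (i + 1) rest

-- the fold's state: indent-flag stack, emitted (indent, content) pairs, current line, level, prev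
structure PvSt where
  flags : List Bool
  out   : List (Int × List Char)
  cur   : List Char
  ind   : Int
  prev  : Option Char

-- '  ' * n + s for one emitted pair
def pvRender (e : Int × List Char) : List Char := pvIndent e.1 ++ e.2

-- the body of B's main fold (counts[i] is always present at a '<'; getD 0 is safe)
def pvStep (counts : PySem.Dict Nat Int) (mp : Int) (st : PvSt) (p : Nat × Char) : PvSt :=
  if p.2 = '<' ∧ pvAdj st.prev then
    if mp ≤ counts.getD p.1 0 then
      { flags := true :: st.flags, out := st.out ++ [(st.ind, st.cur ++ ['<'])], cur := [], ind := st.ind + 1, prev := some p.2 }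
    else
      { st with flags := false :: st.flags, cur := st.cur ++ ['<'], prev := some p.2 }
  else if p.2 = '>' then
    match st.flags with
    | true :: fs =>
      let kept := if PySem.Chars.strip st.cur = [] then st.out else st.out ++ [(st.ind, st.cur)]
      { flags := fs, out := kept ++ [(max 0 (st.ind - 1), ['>'])], cur := if PySem.Chars.strip st.cur = [] then st.cur else [], ind := max 0 (st.ind - 1), prev := some p.2 }
    | false :: fs => { st with flags := fs, cur := st.cur ++ ['>'], prev := some p.2 }
    | [] => { st with cur := st.cur ++ ['>'], prev := some p.2 }
  else if p.2 = ',' then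
    match st.flags with
    | true :: _ => { st with out := st.out ++ [(st.ind, st.cur ++ [','])], cur := [], prev := some p.2 }
    | _ => { st with cur := st.cur ++ [','], prev := some p.2 }
  else if p.2 = '\n' then
    let kept := if PySem.Chars.strip st.cur = [] then st.out else st.out ++ [(st.ind, st.cur)]
    { st with
      out := kept ++ [(0, [])],
      cur := if PySem.Chars.strip st.cur = [] then st.cur else [],
      prev := some p.2 }
  else { st with cur := st.cur ++ [p.2], prev := some p.2 }

def format_template_error_alt (text : String) (min_params : Int) : String :=
  let cs := text.toList
  let counts := pass1 cs 0 [] ⟨[]⟩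
  let st := (pvEnum 0 cs).foldl (pvStep counts min_params) ⟨[], [], [], 0, none⟩
  let final := if PySem.Chars.strip st.cur = [] then st.out else st.out ++ [(st.ind, st.cur)]
  String.ofList (PySem.Chars.join ['\n'] (final.map pvRender))

-- ===== PRECONDITION & SPEC =====
def Spec_format_template_error (text : String) (min_params : Int) (out : String) : Prop := out = format_template_error_alt text min_params
instance (text : String) (min_params : Int) (out : String) : Decidable (Spec_format_template_error text min_params out) := by unfold Spec_format_template_error; infer_instance

-- ===== CLAIM (what is proved, stated in full; the proofs are below) =====
def Claim_equal_format_template_error : Prop := ∀ (text : String) (min_params : Int), Dom_format_template_error text min_params → Spec_format_template_error text min_params (format_template_error text min_params)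

-- ===== LEMMAS AND PROOFS =====

-- invariant of B's pre-pass stack: entry (p, c) at distance l from the top is an unmatched '<'
-- whose count_template_params run has reached index i with depth l+1 and running count c
def StkInv (full : List Char) (i : Nat) (stack : List (Nat × Int)) : Prop :=
  (List.Pairwise (fun a b : Nat × Int => b.1 < a.1) stack) ∧
  ∀ (l : Nat) (p : Nat) (c : Int), stack[l]? = some (p, c) → p < i ∧ full[p]? = some '<' ∧
    count_tp_loop (full.drop i) (full.drop p) ((l : Int) + 1) c (i - p) = count_template_params (full.drop p)

-- invariant of B's counts dict: every matched '<' before i is already recorded correctly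
def CntInv (full : List Char) (i : Nat) (stack : List (Nat × Int)) (counts : PySem.Dict Nat Int) : Prop :=
  ∀ p, p < i → full[p]? = some '<' → p ∉ stack.map Prod.fst →
    counts.getD p 0 = count_template_params (full.drop p)

lemma foldl_insert_getD_not_mem (l : List (Nat × Int)) (d : PySem.Dict Nat Int) (p : Nat)
    (h : p ∉ l.map Prod.fst) :
    (l.foldl (fun d e => d.insert e.1 e.2) d).getD p 0 = d.getD p 0 := by
  induction l generalizing d with
  | nil => rfl
  | cons e t ih =>
    simp only [List.map_cons, List.mem_cons, not_or] at h
    rw [List.foldl_cons, ih _ h.2, PySem.Dict.getD_insert]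
    simp [h.1]

lemma foldl_insert_getD_mem (l : List (Nat × Int)) (d : PySem.Dict Nat Int) (p : Nat) (c : Int)
    (hmem : (p, c) ∈ l) (hnd : (l.map Prod.fst).Nodup) :
    (l.foldl (fun d e => d.insert e.1 e.2) d).getD p 0 = c := by
  induction l generalizing d with
  | nil => simp at hmem
  | cons e t ih =>
    simp only [List.map_cons, List.nodup_cons] at hnd
    rcases List.mem_cons.mp hmem with h | h
    · subst h
      rw [List.foldl_cons, foldl_insert_getD_not_mem _ _ _ hnd.1, PySem.Dict.getD_insert]
      simp
    · rw [List.foldl_cons]; exact ih _ h hnd.2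

-- the strip() == '<>' test in count_template_params is exactly "the '>' is adjacent"
lemma strip_slice_eq_iff (orig : List Char) (k : Nat) (h0 : orig[0]? = some '<')
    (hk : orig[k]? = some '>') (hk1 : 1 ≤ k) :
    (PySem.Chars.strip (PySem.List.slice orig (some 0) (some ((k : Nat) + 1))) = ['<', '>']) ↔ k = 1 := by
  have hklen : k < orig.length := by
    rcases List.getElem?_eq_some_iff.mp hk with ⟨h, _⟩; exact h
  have hsl : PySem.List.slice orig (some 0) (some ((k : Nat) + 1)) = orig.take (k + 1) := by
    have := PySem.List.slice_natCast orig 0 (k + 1)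
    simpa using this
  rw [hsl]
  have htlen : (orig.take (k + 1)).length = k + 1 := by
    rw [List.length_take]; omega
  have ht0 : (orig.take (k + 1))[0]? = some '<' := by
    rw [List.getElem?_take_of_lt (by omega)]; exact h0
  have htk : (orig.take (k + 1))[k]? = some '>' := by
    rw [List.getElem?_take_of_lt (by omega)]; exact hk
  obtain ⟨t1, ht1⟩ : ∃ t1, orig.take (k + 1) = '<' :: t1 := by
    cases htc : orig.take (k + 1) with
    | nil => rw [htc] at ht0; simp at ht0
    | cons a u =>
      rw [htc] at ht0
      simp only [List.getElem?_cons_zero, Option.some.injEq] at ht0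
      exact ⟨u, by rw [ht0]⟩
  obtain ⟨t2, ht2⟩ : ∃ t2, (orig.take (k + 1)).reverse = '>' :: t2 := by
    have hrev0 : (orig.take (k + 1)).reverse[0]? = some '>' := by
      rw [List.getElem?_reverse (by omega)]
      simpa [htlen] using htk
    cases htc : (orig.take (k + 1)).reverse with
    | nil => rw [htc] at hrev0; simp at hrev0
    | cons b u =>
      rw [htc] at hrev0
      simp only [List.getElem?_cons_zero, Option.some.injEq] at hrev0
      exact ⟨u, by rw [hrev0]⟩
  have hs1 : (PySem.Chars.isspace '<' = true) → False := by decide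
  have hs2 : (PySem.Chars.isspace '>' = true) → False := by decide
  have hstrip : PySem.Chars.strip (orig.take (k + 1)) = orig.take (k + 1) := by
    simp only [PySem.Chars.strip, PySem.Chars.lstrip, PySem.Chars.rstrip]
    rw [ht1, List.dropWhile_cons_of_neg (by simpa using hs1), ← ht1,
        ht2, List.dropWhile_cons_of_neg (by simpa using hs2), ← ht2, List.reverse_reverse]
  rw [hstrip]
  constructor
  · intro heq
    have := congrArg List.length heq
    simp [htlen] at this
    omega
  · intro hk1'
    subst hk1'
    cases orig with
    | nil => simp at h0
    | cons a o1 =>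
      simp only [List.getElem?_cons_zero, Option.some.injEq] at h0
      subst h0
      cases o1 with
      | nil => simp at hk
      | cons b o2 =>
        simp only [List.getElem?_cons_succ, List.getElem?_cons_zero, Option.some.injEq] at hk
        subst hk
        simp

-- one unfolding step of count_template_params' while-loop (definitional)
lemma ctp_step (ch : Char) (r orig : List Char) (depth pc : Int) (k : Nat) :
    count_tp_loop (ch :: r) orig depth pc k =
      if ch = '<' then
        count_tp_loop r orig (depth + 1) (if depth = 0 then 1 else pc) (k + 1)
      else if ch = '>' then
        if depth - 1 = 0 then
          if PySem.Chars.strip (PySem.List.slice orig (some 0) (some ((k : Int) + 1))) = ['<', '>'] then 0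
          else pc
        else count_tp_loop r orig (depth - 1) pc (k + 1)
      else if ch = ',' ∧ depth = 1 then count_tp_loop r orig depth (pc + 1) (k + 1)
      else count_tp_loop r orig depth pc (k + 1) := by
  rw [count_tp_loop]

-- B's pre-pass computes count_template_params at every '<'
lemma pass1_sound (full : List Char) (cs : List Char) (i : Nat) (stack : List (Nat × Int))
    (counts : PySem.Dict Nat Int) (hcs : cs = full.drop i) (hstk : StkInv full i stack)
    (hcnt : CntInv full i stack counts) :
    ∀ p, full[p]? = some '<' →
      (pass1 cs i stack counts).getD p 0 = count_template_params (full.drop p) := by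
  induction cs generalizing i stack counts with
  | nil =>
    intro p hp
    obtain ⟨hpw, hent⟩ := hstk
    have hlen : full.length ≤ i := by
      have h := congrArg List.length hcs
      simp only [List.length_nil, List.length_drop] at h
      omega
    have hplen : p < full.length := by
      rcases List.getElem?_eq_some_iff.mp hp with ⟨h, _⟩; exact h
    simp only [pass1]
    by_cases hmem : p ∈ stack.map Prod.fst
    · obtain ⟨e, hinl, hpe⟩ := List.mem_map.mp hmem
      have hee : e = (p, e.2) := by cases e; simp_all
      obtain ⟨l, hlt, hle⟩ := List.getElem_of_mem hinl
      have hl? : stack[l]? = some (p, e.2) := by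
        rw [List.getElem?_eq_getElem hlt, hle, hee]
      have h3 := (hent l p e.2 hl?).2.2
      rw [← hcs] at h3
      simp only [count_tp_loop] at h3
      have hnd : (stack.reverse.map Prod.fst).Nodup := by
        rw [List.map_reverse, List.nodup_reverse]
        exact List.pairwise_map.mpr (hpw.imp (fun h => by omega))
      rw [foldl_insert_getD_mem _ _ p e.2 (List.mem_reverse.mpr (hee ▸ hinl)) hnd]
      exact h3
    · rw [foldl_insert_getD_not_mem _ _ _ (by simpa using hmem)]
      exact hcnt p (by omega) hp hmem
  | cons ch rest ih =>
    intro p hp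
    obtain ⟨hpw, hent⟩ := hstk
    have hi : i < full.length := by
      by_contra hcon
      rw [List.drop_eq_nil_of_le (by omega)] at hcs
      simp at hcs
    have hcs' := hcs
    rw [List.drop_eq_getElem_cons hi] at hcs'
    injection hcs' with hch hrest
    have hfig : full[i]? = some ch := by rw [List.getElem?_eq_getElem hi, ← hch]
    have hfi : full.drop i = ch :: full.drop (i + 1) := by
      rw [List.drop_eq_getElem_cons hi, ← hch]
    by_cases h1 : ch = '<'
    · subst h1
      simp only [pass1, reduceIte]
      refine ih (i + 1) ((i, 1) :: stack) counts hrest ⟨?_, ?_⟩ ?_ p hp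
      · refine List.Pairwise.cons ?_ hpw
        intro e he
        obtain ⟨l, hlt, hle⟩ := List.getElem_of_mem he
        exact (hent l e.1 e.2 (by rw [List.getElem?_eq_getElem hlt, hle])).1
      · intro l p' c' hl
        cases l with
        | zero =>
          simp only [List.getElem?_cons_zero, Option.some.injEq, Prod.mk.injEq] at hl
          obtain ⟨hp', hc'⟩ := hl
          subst hp'; subst hc'
          refine ⟨by omega, hfig, ?_⟩
          rw [count_template_params]
          rw [show (((0 : Nat) : Int) + 1) = (1 : Int) by norm_num, show i + 1 - i = 1 by omega]
          conv_rhs => rw [hfi]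
          rw [ctp_step, if_pos rfl, if_pos rfl, hfi]
          norm_num
        | succ l' =>
          simp only [List.getElem?_cons_succ] at hl
          obtain ⟨hplt, hpch, heq⟩ := hent l' p' c' hl
          refine ⟨by omega, hpch, ?_⟩
          rw [hfi, ctp_step, if_pos rfl] at heq
          rw [if_neg (by omega : ¬ ((l' : Int) + 1 = 0))] at heq
          rw [show (((l' + 1 : Nat) : Int) + 1) = (l' : Int) + 1 + 1 by push_cast; ring,
              show i + 1 - p' = (i - p') + 1 by omega]
          exact heq
      · intro q hqlt hq hnm
        simp only [List.map_cons, List.mem_cons, not_or] at hnm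
        have hne := hnm.1
        exact hcnt q (by omega) hq hnm.2
    · by_cases h4 : ch = '>'
      · subst h4
        rcases stack with _ | ⟨⟨pos, c⟩, stk⟩
        · simp only [pass1, reduceIte]
          refine ih (i + 1) [] counts hrest ⟨List.Pairwise.nil, by intro l p' c' h; simp at h⟩ ?_ p hp
          intro q hqlt hq hnm
          have hqi : q ≠ i := by
            intro he; subst he; rw [hfig] at hq; simp at hq
          exact hcnt q (by omega) hq (by simp)
        · obtain ⟨hposlt, hposch, heq⟩ := hent 0 pos c (by simp)
          rw [hfi, ctp_step, if_neg (by decide), if_pos rfl,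
              if_pos (by norm_num : ((0 : Nat) : Int) + 1 - 1 = 0)] at heq
          have hstrip := strip_slice_eq_iff (full.drop pos) (i - pos)
            (by rw [List.getElem?_drop]; simpa using hposch)
            (by rw [List.getElem?_drop, show pos + (i - pos) = i by omega]; exact hfig)
            (by omega)
          have hv : (if i = pos + 1 then (0 : Int) else c) = count_template_params (full.drop pos) := by
            rw [← heq]
            by_cases hip : i = pos + 1
            · rw [if_pos hip, if_pos (hstrip.mpr (by omega))]
            · rw [if_neg hip, if_neg (fun hcon => hip (by have := hstrip.mp hcon; omega))]
          simp only [pass1, reduceIte]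
          refine ih (i + 1) stk (counts.insert pos (if i = pos + 1 then 0 else c)) hrest
            ⟨(List.pairwise_cons.mp hpw).2, ?_⟩ ?_ p hp
          · intro l p' c' hl
            obtain ⟨hplt, hpch, heq'⟩ := hent (l + 1) p' c' (by simpa using hl)
            refine ⟨by omega, hpch, ?_⟩
            rw [hfi, ctp_step, if_neg (by decide), if_pos rfl] at heq'
            rw [if_neg (by push_cast; omega : ¬ (((l + 1 : Nat) : Int) + 1 - 1 = 0))] at heq'
            rw [show ((l : Int) + 1) = ((l + 1 : Nat) : Int) + 1 - 1 by push_cast; ring,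
                show i + 1 - p' = (i - p') + 1 by omega]
            exact heq'
          · intro q hqlt hq hnm
            have hqi : q ≠ i := by
              intro he; subst he; rw [hfig] at hq; simp at hq
            rw [PySem.Dict.getD_insert]
            by_cases hqp : q = pos
            · subst hqp; rw [if_pos rfl]; exact hv
            · rw [if_neg hqp]
              refine hcnt q (by omega) hq ?_
              simp only [List.map_cons, List.mem_cons, not_or]
              exact ⟨hqp, hnm⟩
      · by_cases h5 : ch = ','
        · subst h5
          rcases stack with _ | ⟨⟨pos, c⟩, stk⟩
          · simp only [pass1, reduceIte]
            refine ih (i + 1) [] counts hrest ⟨List.Pairwise.nil, by intro l p' c' h; simp at h⟩ ?_ p hp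
            intro q hqlt hq hnm
            have hqi : q ≠ i := by
              intro he; subst he; rw [hfig] at hq; simp at hq
            exact hcnt q (by omega) hq (by simp)
          · simp only [pass1, reduceIte]
            refine ih (i + 1) ((pos, c + 1) :: stk) counts hrest ⟨?_, ?_⟩ ?_ p hp
            · exact List.pairwise_cons.mpr ⟨(List.pairwise_cons.mp hpw).1, (List.pairwise_cons.mp hpw).2⟩
            · intro l p' c' hl
              cases l with
              | zero =>
                simp only [List.getElem?_cons_zero, Option.some.injEq, Prod.mk.injEq] at hl
                obtain ⟨hp', hc'⟩ := hl
                obtain ⟨hposlt, hposch, heq⟩ := hent 0 pos c (by simp)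
                subst hp'
                refine ⟨by omega, hposch, ?_⟩
                rw [hfi, ctp_step, if_neg (by decide), if_neg (by decide),
                    if_pos ⟨rfl, by norm_num⟩] at heq
                rw [← hc', show i + 1 - pos = (i - pos) + 1 by omega]
                exact heq
              | succ l' =>
                simp only [List.getElem?_cons_succ] at hl
                obtain ⟨hplt, hpch, heq⟩ := hent (l' + 1) p' c' (by simpa using hl)
                refine ⟨by omega, hpch, ?_⟩
                rw [hfi, ctp_step, if_neg (by decide), if_neg (by decide),
                    if_neg (by push_cast; omega :
                      ¬ (',' = ',' ∧ ((l' + 1 : Nat) : Int) + 1 = 1))] at heq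
                rw [show i + 1 - p' = (i - p') + 1 by omega]
                exact heq
            · intro q hqlt hq hnm
              have hqi : q ≠ i := by
                intro he; subst he; rw [hfig] at hq; simp at hq
              refine hcnt q (by omega) hq ?_
              simpa using hnm
        · simp only [pass1]
          rw [if_neg h1, if_neg h4, if_neg h5]
          refine ih (i + 1) stack counts hrest ⟨hpw, ?_⟩ ?_ p hp
          · intro l p' c' hl
            obtain ⟨hplt, hpch, heq⟩ := hent l p' c' hl
            refine ⟨by omega, hpch, ?_⟩
            rw [hfi, ctp_step, if_neg h1, if_neg h4,
                if_neg (by simp [h5])] at heq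
            rw [show i + 1 - p' = (i - p') + 1 by omega]
            exact heq
          · intro q hqlt hq hnm
            have hqi : q ≠ i := by
              intro he; subst he; rw [hfig] at hq; simp [h1] at hq
            exact hcnt q (by omega) hq hnm

-- A's main loop equals B's fold, with A's rendered lines the image of B's pairs under pvRender
lemma main_sim (cs : List Char) (i : Nat) (prev : Option Char) (mp : Int)
    (counts : PySem.Dict Nat Int) (out : List (Int × List Char)) (cur : List Char) (ind : Int)
    (stk : List Bool)
    (H : ∀ k, cs[k]? = some '<' → counts.getD (i + k) 0 = count_template_params (cs.drop k)) :
    fmt_loop cs prev mp (out.map pvRender) cur ind stk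
      = (let st := (pvEnum i cs).foldl (pvStep counts mp) ⟨stk, out, cur, ind, prev⟩;
         (st.out.map pvRender, st.cur, st.ind)) := by
  induction cs generalizing i prev out cur ind stk with
  | nil => simp [fmt_loop, pvEnum]
  | cons ch rest ih =>
    have H' : ∀ k, rest[k]? = some '<' →
        counts.getD (i + 1 + k) 0 = count_template_params (rest.drop k) := by
      intro k hk
      have h := H (k + 1) (by simpa using hk)
      rw [List.drop_succ_cons] at h
      rw [show i + 1 + k = i + (k + 1) by omega]
      exact h
    rw [pvEnum, List.foldl_cons]
    by_cases h1 : ch = '<'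
    · subst h1
      by_cases h2 : pvAdj prev
      · have H0 := H 0 (by simp)
        simp only [Nat.add_zero, List.drop_zero] at H0
        by_cases h3 : mp ≤ count_template_params ('<' :: rest)
        · simp only [fmt_loop, pvStep, h2, h3, H0, and_self, if_pos, reduceIte]
          rw [show (out.map pvRender) ++ [pvIndent ind ++ (cur ++ ['<'])]
              = (out ++ [(ind, cur ++ ['<'])]).map pvRender by simp [pvRender]]
          exact ih _ _ _ _ _ _ H'
        · simp only [fmt_loop, pvStep, h2, h3, H0, and_self, if_pos, reduceIte]
          exact ih _ _ _ _ _ _ H'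
      · have hc : ¬ ('<' = '<' ∧ pvAdj prev = true) := by simp [h2]
        simp only [fmt_loop, pvStep, h2, hc, reduceIte, if_pos]
        exact ih _ _ _ _ _ _ H'
    · by_cases h4 : ch = '>'
      · subst h4
        have hc : ¬ ('>' = '<' ∧ pvAdj prev = true) := by simp
        match stk with
        | true :: stk' =>
          simp only [fmt_loop, pvStep, hc, reduceIte]
          by_cases hs : PySem.Chars.strip cur = []
          · simp only [hs, reduceIte, if_pos]
            rw [show (out.map pvRender) ++ [pvIndent (max 0 (ind - 1)) ++ ['>']]
                = (out ++ [(max 0 (ind - 1), ['>'])]).map pvRender by simp [pvRender]]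
            exact ih _ _ _ _ _ _ H'
          · simp only [hs, reduceIte, if_neg]
            rw [show (out.map pvRender ++ [pvIndent ind ++ cur]) ++ [pvIndent (max 0 (ind - 1)) ++ ['>']]
                = ((out ++ [(ind, cur)]) ++ [(max 0 (ind - 1), ['>'])]).map pvRender by simp [pvRender]]
            exact ih _ _ _ _ _ _ H'
        | false :: stk' =>
          simp only [fmt_loop, pvStep, hc, reduceIte]
          exact ih _ _ _ _ _ _ H'
        | [] =>
          simp only [fmt_loop, pvStep, hc, reduceIte]
          exact ih _ _ _ _ _ _ H'
      · by_cases h5 : ch = ','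
        · subst h5
          have hc : ¬ (',' = '<' ∧ pvAdj prev = true) := by simp
          match stk with
          | true :: stk' =>
            simp only [fmt_loop, pvStep, hc, reduceIte]
            rw [show (out.map pvRender) ++ [pvIndent ind ++ cur ++ [',']]
                = (out ++ [(ind, cur ++ [','])]).map pvRender by simp [pvRender]]
            exact ih _ _ _ _ _ _ H'
          | false :: stk' =>
            simp only [fmt_loop, pvStep, hc, reduceIte]
            exact ih _ _ _ _ _ _ H'
          | [] =>
            simp only [fmt_loop, pvStep, hc, reduceIte]
            exact ih _ _ _ _ _ _ H'
        · by_cases h6 : ch = '\n'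
          · subst h6
            have hc : ¬ ('\n' = '<' ∧ pvAdj prev = true) := by simp
            simp only [fmt_loop, pvStep, hc, reduceIte]
            by_cases hs : PySem.Chars.strip cur = []
            · simp only [hs, reduceIte, if_pos]
              rw [show (out.map pvRender) ++ [[]]
                  = (out ++ [((0 : Int), ([] : List Char))]).map pvRender by simp [pvRender, pvIndent]]
              exact ih _ _ _ _ _ _ H'
            · simp only [hs, reduceIte, if_neg]
              rw [show (out.map pvRender ++ [pvIndent ind ++ cur]) ++ [[]]
                  = ((out ++ [(ind, cur)]) ++ [((0 : Int), ([] : List Char))]).map pvRender by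
                    simp [pvRender, pvIndent]]
              exact ih _ _ _ _ _ _ H'
          · have hc : ¬ (ch = '<' ∧ pvAdj prev = true) := by simp [h1]
            simp only [fmt_loop, pvStep, h1, h4, h5, h6, hc, if_false, reduceIte]
            exact ih _ _ _ _ _ _ H'

lemma ports_agree (text : String) (mp : Int) :
    format_template_error text mp = format_template_error_alt text mp := by
  have H := pass1_sound text.toList text.toList 0 [] ⟨[]⟩ rfl
    ⟨List.Pairwise.nil, by intro l p c h; simp at h⟩
    (by intro p hp; exact absurd hp (Nat.not_lt_zero p))
  unfold format_template_error format_template_error_alt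
  have hm := main_sim text.toList 0 none mp (pass1 text.toList 0 [] ⟨[]⟩) [] [] 0 []
    (fun k hk => by simpa using H k hk)
  simp only [List.map_nil] at hm
  rw [hm]
  by_cases hs : PySem.Chars.strip
      ((pvEnum 0 text.toList).foldl (pvStep (pass1 text.toList 0 [] ⟨[]⟩) mp)
        ⟨[], [], [], 0, none⟩).cur = []
  · simp only [hs, reduceIte]
  · simp only [hs, reduceIte, List.map_append, List.map_cons, List.map_nil]
    simp [pvRender]

-- ===== VERDICT (by name: the statement is the Claim_ definition above) =====
theorem format_template_error_spec : Claim_equal_format_template_error := by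
  intro text mp _
  unfold Spec_format_template_error
  exact ports_agree text mp
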